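-- pv_equiv track=rewrite | github.com/pinkmann300/dsa_cpp | data_structures/stacks/numberOfNges.py | numberOfNGEs
-- ===== SOURCE A (Python) =====
-- def numberOfNGEs(nums1, nums2):
--
--     ngeDict = {}
--     ngeStack = []
--     for i in range(len(nums2) - 1, -1, -1):
--         while (ngeStack and ngeStack[len(ngeStack) - 1] <= nums2[i]):
--             ngeStack.pop()
--
--         ngeDict[nums2[i]] = len(ngeStack)
--         ngeStack.append(nums2[i])
--
--     finalArr = []
--
--     for ko in nums1:
--         finalArr.append(ngeDict[ko])
--
--     return finalArr
-- ===== SOURCE B (Python) =====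
-- def numberOfNGEs(nums1, nums2):
--     # For each query value: find its first occurrence in nums2, then count the
--     # new running maxima strictly above it in the remainder (no stack, no table).
--     res = []
--     for ko in nums1:
--         cur = ko
--         cnt = 0
--         for x in nums2[nums2.index(ko) + 1:]:
--             if x > cur:
--                 cnt += 1
--                 cur = x
--         res.append(cnt)
--     return res
-- ===== Notes on version B (the rewrite author's own statement) =====
-- stated objective: alternative
-- what changed: Replaces the right-to-left monotonic-stack precomputation with an answer dict by an independent per-query forward running-maximum scan from the first occurrence of each queried value.
import Mathlib
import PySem

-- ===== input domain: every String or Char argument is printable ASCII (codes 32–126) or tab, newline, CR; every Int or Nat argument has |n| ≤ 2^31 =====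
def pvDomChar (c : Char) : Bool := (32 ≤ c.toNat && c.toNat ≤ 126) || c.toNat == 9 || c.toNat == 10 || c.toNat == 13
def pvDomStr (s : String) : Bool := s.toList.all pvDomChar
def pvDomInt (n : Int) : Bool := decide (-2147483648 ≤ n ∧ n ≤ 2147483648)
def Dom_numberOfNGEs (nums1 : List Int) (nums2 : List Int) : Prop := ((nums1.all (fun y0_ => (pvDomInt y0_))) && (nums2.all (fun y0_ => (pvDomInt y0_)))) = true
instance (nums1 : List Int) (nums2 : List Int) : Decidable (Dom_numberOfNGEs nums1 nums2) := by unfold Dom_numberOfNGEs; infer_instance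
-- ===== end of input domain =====

-- B replaces A's right-to-left monotonic-stack precomputation by an independent per-query
-- forward running-maximum scan from the first occurrence of each queried value (alternative, same results).

-- ===== PORT A =====
-- 'while ngeStack and ngeStack[-1] <= nums2[i]: ngeStack.pop()'; the stack is represented
-- top-first (append = cons, ngeStack[-1] = head, pop = tail).
def pvPopLe (v : Int) : List Int → List Int
  | [] => []
  | x :: xs => if x ≤ v then pvPopLe v xs else x :: xs

def numberOfNGEs (nums1 : List Int) (nums2 : List Int) : List Int :=
  -- 'for i in range(len(nums2)-1, -1, -1)' reads nums2[i] right-to-left, i.e. iterates nums2.reverse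
  let st := nums2.reverse.foldl
    (fun (s : PySem.Dict Int Int × List Int) v =>
      let stack := pvPopLe v s.2
      (s.1.insert v (stack.length : Int), v :: stack))
    (PySem.Dict.empty, [])
  -- 'finalArr.append(ngeDict[ko])'; ngeDict[ko] raises KeyError when absent — excluded by Pre_
  nums1.foldl (fun acc ko => acc ++ [(st.1.get? ko).getD 0]) []

-- ===== PORT B =====
def numberOfNGEs_alt (nums1 : List Int) (nums2 : List Int) : List Int :=
  nums1.foldl (fun res ko =>
    -- nums2.index(ko) raises ValueError when absent — excluded by Pre_
    let idx := (PySem.List.index? nums2 ko).getD 0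
    -- 'for x in nums2[idx+1:]' with running state (cur, cnt)
    let p := (PySem.List.slice nums2 (some ((idx : Int) + 1)) none).foldl
      (fun (s : Int × Int) x => if s.1 < x then (x, s.2 + 1) else s) (ko, 0)
    res ++ [p.2]) []

-- ===== PRECONDITION & SPEC =====
-- Pre_ excludes exactly the inputs where some queried value is absent from nums2:
-- there A raises KeyError (and B raises ValueError).
def Pre_numberOfNGEs (nums1 : List Int) (nums2 : List Int) : Prop :=
  ∀ ko ∈ nums1, ko ∈ nums2
instance (nums1 : List Int) (nums2 : List Int) : Decidable (Pre_numberOfNGEs nums1 nums2) := by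
  unfold Pre_numberOfNGEs; infer_instance

def pvWitness_numberOfNGEs : List Int × List Int := ([2, 1, 4], [1, 3, 2, 4])

def Spec_numberOfNGEs (nums1 : List Int) (nums2 : List Int) (out : List Int) : Prop := out = numberOfNGEs_alt nums1 nums2
instance (nums1 : List Int) (nums2 : List Int) (out : List Int) : Decidable (Spec_numberOfNGEs nums1 nums2 out) := by unfold Spec_numberOfNGEs; infer_instance

-- ===== CLAIM (what is proved, stated in full; the proofs are below) =====
def Claim_equal_numberOfNGEs : Prop := ∀ (nums1 : List Int) (nums2 : List Int), Dom_numberOfNGEs nums1 nums2 → Pre_numberOfNGEs nums1 nums2 → Spec_numberOfNGEs nums1 nums2 (numberOfNGEs nums1 nums2)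

-- ===== LEMMAS AND PROOFS =====

-- the number of new running maxima strictly above v in l (the common specification)
def pvScan (v : Int) : List Int → Int
  | [] => 0
  | x :: l => if v < x then 1 + pvScan x l else pvScan v l

-- the suffix of l strictly after the first occurrence of v
def pvAfter (v : Int) : List Int → List Int
  | [] => []
  | x :: l => if x = v then l else pvAfter v l

-- A's right-to-left loop, as structural recursion on the list
def pvState : List Int → PySem.Dict Int Int × List Int
  | [] => (PySem.Dict.empty, [])
  | x :: l =>
    let s := pvState l
    let stack := pvPopLe x s.2
    (s.1.insert x (stack.length : Int), x :: stack)

theorem pvPopLe_popLe (v x : Int) (h : x ≤ v) (l : List Int) :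
    pvPopLe v (pvPopLe x l) = pvPopLe v l := by
  induction l with
  | nil => rfl
  | cons y l ih =>
    by_cases hy : y ≤ x
    · simp [pvPopLe, hy, le_trans hy h, ih]
    · simp [pvPopLe, hy]

theorem pvState_stack (l : List Int) (v : Int) :
    ((pvPopLe v (pvState l).2).length : Int) = pvScan v l := by
  induction l generalizing v with
  | nil => rfl
  | cons x l ih =>
    by_cases hx : v < x
    · simp [pvState, pvScan, pvPopLe, hx, not_le.mpr hx, ← ih x]
      omega
    · have hx' : x ≤ v := not_lt.mp hx
      simp [pvState, pvScan, pvPopLe, hx, hx', pvPopLe_popLe v x hx', ih v]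

theorem pvState_dict (l : List Int) (v : Int) :
    (pvState l).1.get? v = if v ∈ l then some (pvScan v (pvAfter v l)) else none := by
  induction l with
  | nil => simp [pvState, PySem.Dict.get?_empty]
  | cons x l ih =>
    by_cases hv : v = x
    · subst hv
      simp [pvState, pvAfter, PySem.Dict.get?_insert_self, pvState_stack l v]
    · simp only [pvState, pvAfter]
      rw [PySem.Dict.get?_insert _ _ _ _, if_neg hv, ih,
        if_neg (fun h : x = v => hv h.symm)]
      simp [List.mem_cons, hv]

-- A's fold over nums2.reverse is pvState
theorem pvFold_eq_state (l : List Int) :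
    l.reverse.foldl
      (fun (s : PySem.Dict Int Int × List Int) v =>
        let stack := pvPopLe v s.2
        (s.1.insert v (stack.length : Int), v :: stack))
      (PySem.Dict.empty, []) = pvState l := by
  rw [List.foldl_reverse]
  induction l with
  | nil => rfl
  | cons x l ih => simp [List.foldr_cons, ih, pvState]

-- B's forward scan computes pvScan
theorem pvFoldScan (l : List Int) (cur c : Int) :
    (l.foldl (fun (s : Int × Int) x => if s.1 < x then (x, s.2 + 1) else s) (cur, c)).2
      = c + pvScan cur l := by
  induction l generalizing cur c with
  | nil => simp [pvScan]
  | cons x l ih =>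
    by_cases h : cur < x
    · simp [pvScan, h, ih]; ring
    · simp [pvScan, h, ih]

-- the element after the first occurrence: index? gives pvAfter via drop
theorem pvDrop_index (l : List Int) (v : Int) (i : ℕ) (h : PySem.List.index? l v = some i) :
    l.drop (i + 1) = pvAfter v l := by
  induction l generalizing i with
  | nil => simp [PySem.List.index?] at h
  | cons x l ih =>
    by_cases hx : x = v
    · subst hx
      rw [PySem.List.index?_cons_self] at h
      cases h
      simp [pvAfter]
    · rw [PySem.List.index?_cons_of_ne l hx] at h
      cases hj : PySem.List.index? l v with
      | none => rw [hj] at h; simp at h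
      | some j =>
        rw [hj] at h
        simp at h
        subst h
        simp [pvAfter, hx, ih j hj]

theorem pvFoldl_append {α β : Type} (l : List α) (f : α → β) (acc : List β) :
    l.foldl (fun acc k => acc ++ [f k]) acc = acc ++ l.map f := by
  induction l generalizing acc with
  | nil => simp
  | cons x l ih => simp [ih]

-- ===== VERDICT (by name: the statement is the Claim_ definition above) =====
theorem numberOfNGEs_spec : Claim_equal_numberOfNGEs := by
  intro nums1 nums2 _ hpre
  unfold Spec_numberOfNGEs numberOfNGEs numberOfNGEs_alt
  rw [pvFold_eq_state]
  rw [pvFoldl_append nums1 (fun ko => ((pvState nums2).1.get? ko).getD 0) []]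
  rw [pvFoldl_append nums1 _ []]
  apply List.map_congr_left
  intro ko hko
  have hmem : ko ∈ nums2 := hpre ko hko
  rw [pvState_dict nums2 ko, if_pos hmem]
  obtain ⟨i, hi⟩ := (PySem.List.index?_isSome_iff nums2 ko).mpr hmem |> Option.isSome_iff_exists.mp
  -- hi : index? nums2 ko = some i  (up to shape)
  simp only [hi, Option.getD_some]
  have hslice : PySem.List.slice nums2 (some ((i : Int) + 1)) none = nums2.drop (i + 1) := by
    have : ((i : Int) + 1) = ((i + 1 : ℕ) : Int) := by push_cast; ring
    rw [this, PySem.List.slice_from_natCast]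
  rw [hslice, pvDrop_index nums2 ko i hi, pvFoldScan]
  simp
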